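-- pv_equiv track=rewrite | github.com/TheMoonK1d/St.Marry-University_Computer_Science | run_erteb.py | block_id
-- ===== SOURCE A (Python) =====
-- def block_id(id_High, checkByte, id_Low):
--     accountBits = id_High << 16 | checkByte << 8 | id_Low
--     account = []
--     for _ in range(4):
--         second = accountBits & 0x07
--         accountBits >>= 3
--         first = accountBits & 0x07
--         accountBits >>= 3
--         account.append(first)
--         account.append(second)
--
--     return ''.join(map(str, account))
-- ===== SOURCE B (Python) =====
-- def block_id(id_High, checkByte, id_Low):
--     v = (id_High << 16 | checkByte << 8 | id_Low) & 0xFFFFFF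
--     s = format(v, '08o')
--     return ''.join(s[i:i+2] for i in range(6, -1, -2))
-- ===== Notes on version B (the rewrite author's own statement) =====
-- stated objective: idiomatic
-- what changed: Replaces the 8-step shift-and-mask loop with list building by a single 24-bit mask, a zero-padded octal formatting ('08o'), and a reversal of the four 2-character pairs.
import Mathlib
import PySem

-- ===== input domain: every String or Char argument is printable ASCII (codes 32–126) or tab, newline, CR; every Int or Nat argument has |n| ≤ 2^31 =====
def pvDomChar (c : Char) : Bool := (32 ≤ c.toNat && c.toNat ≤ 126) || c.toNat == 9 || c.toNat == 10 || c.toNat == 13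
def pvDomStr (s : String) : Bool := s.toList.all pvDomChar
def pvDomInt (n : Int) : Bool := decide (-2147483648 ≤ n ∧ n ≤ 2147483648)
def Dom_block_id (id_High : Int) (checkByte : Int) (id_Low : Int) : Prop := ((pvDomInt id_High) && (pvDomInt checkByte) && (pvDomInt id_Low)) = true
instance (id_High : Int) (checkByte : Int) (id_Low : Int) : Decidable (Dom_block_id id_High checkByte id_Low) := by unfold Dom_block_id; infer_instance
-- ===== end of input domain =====

-- B replaces A's 8-step shift/mask loop by one mask to 24 bits, a zero-padded octal
-- rendering, and a reversal of the four 2-digit pairs (objective: idiomatic).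
-- Both programs are total; return values only, no mutation.

-- B replaces A's 8-step shift/mask loop by one mask to the low 24 bits, a zero-padded
-- octal rendering, and a reversal of the four 2-digit pairs (objective: idiomatic; both total).

-- ===== PORT A =====
-- Int.shiftLeft / Int.shiftRight are exact for Python's << / >> (arithmetic shift, floor).
def block_id (id_High : Int) (checkByte : Int) (id_Low : Int) : String :=
  let accountBits :=
    PySem.Int.bor (PySem.Int.bor (Int.shiftLeft id_High 16) (Int.shiftLeft checkByte 8)) id_Low
  let st := (List.range 4).foldl (fun (st : Int × List Int) _ =>
      let second := PySem.Int.band st.1 0x07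
      let bits1 := Int.shiftRight st.1 3
      let first := PySem.Int.band bits1 0x07
      let bits2 := Int.shiftRight bits1 3
      (bits2, st.2 ++ [first, second])) (accountBits, [])
  PySem.Str.join "" (st.2.map PySem.Int.toStr)

-- ===== PORT B =====
-- format(v, '08o') for 0 ≤ v < 8^8: the 8 octal digits, high to low.
def pvOct8 (v : Nat) : List Char :=
  (List.range 8).map (fun i => Nat.digitChar (v / 8 ^ (7 - i) % 8))

def block_id_alt (id_High : Int) (checkByte : Int) (id_Low : Int) : String :=
  let v := PySem.Int.band
    (PySem.Int.bor (PySem.Int.bor (Int.shiftLeft id_High 16) (Int.shiftLeft checkByte 8)) id_Low)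
    0xFFFFFF
  let s := pvOct8 v.toNat
  String.ofList (PySem.Chars.join []
    ((PySem.List.pyRange 6 (-1) (-2)).map (fun i => PySem.List.slice s (some i) (some (i + 2)))))

-- ===== PRECONDITION & SPEC =====
def Spec_block_id (id_High : Int) (checkByte : Int) (id_Low : Int) (out : String) : Prop := out = block_id_alt id_High checkByte id_Low
instance (id_High : Int) (checkByte : Int) (id_Low : Int) (out : String) : Decidable (Spec_block_id id_High checkByte id_Low out) := by unfold Spec_block_id; infer_instance

-- ===== CLAIM (what is proved, stated in full; the proofs are below) =====
def Claim_equal_block_id : Prop := ∀ (id_High : Int) (checkByte : Int) (id_Low : Int), Dom_block_id id_High checkByte id_Low → Spec_block_id id_High checkByte id_Low (block_id id_High checkByte id_Low)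

-- ===== LEMMAS AND PROOFS =====
theorem pv_shr3 (n : Int) : Int.shiftRight n 3 = n / 8 := by
  cases n with
  | ofNat m =>
      show Int.ofNat (m >>> 3) = _
      rw [Nat.shiftRight_eq_div_pow]; norm_num
  | negSucc m =>
      show Int.negSucc (m >>> 3) = _
      rw [Nat.shiftRight_eq_div_pow]; norm_num [Int.negSucc_eq]; omega

theorem pv_band7 (n : Int) : PySem.Int.band n 7 = n % 8 := by
  unfold PySem.Int.band
  have e7 : (7:Int).toNat = 7 := rfl
  split
  · norm_num [e7]
    have h : n.toNat &&& 7 = n.toNat % 8 := by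
      have := Nat.and_two_pow_sub_one_eq_mod n.toNat 3
      norm_num at this; exact this
    rw [h]; omega
  · norm_num [e7]
    have h : 7 &&& ((-n).toNat - 1) = ((-n).toNat - 1) % 8 := by
      rw [Nat.and_comm]
      have := Nat.and_two_pow_sub_one_eq_mod ((-n).toNat - 1) 3
      norm_num at this; exact this
    rw [h]; omega

theorem pv_band24 (n : Int) : PySem.Int.band n 16777215 = n % 16777216 := by
  unfold PySem.Int.band
  have e : (16777215:Int).toNat = 16777215 := rfl
  split
  · norm_num [e]
    have h : n.toNat &&& 16777215 = n.toNat % 16777216 := by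
      have := Nat.and_two_pow_sub_one_eq_mod n.toNat 24
      norm_num at this; exact this
    rw [h]; omega
  · norm_num [e]
    have h : 16777215 &&& ((-n).toNat - 1) = ((-n).toNat - 1) % 16777216 := by
      rw [Nat.and_comm]
      have := Nat.and_two_pow_sub_one_eq_mod ((-n).toNat - 1) 24
      norm_num at this; exact this
    rw [h]; omega

theorem pv_toChars_digit (d : Int) (h0 : 0 ≤ d) (h8 : d < 8) :
    PySem.Int.toChars d = [Nat.digitChar d.toNat] := by
  interval_cases d <;> decide

theorem pv_core (n : Int) :
    PySem.Str.join ""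
      ((((List.range 4).foldl (fun (st : Int × List Int) _ =>
        let second := PySem.Int.band st.1 0x07
        let bits1 := Int.shiftRight st.1 3
        let first := PySem.Int.band bits1 0x07
        let bits2 := Int.shiftRight bits1 3
        (bits2, st.2 ++ [first, second])) (n, [])).2).map PySem.Int.toStr) =
    String.ofList (PySem.Chars.join []
      ((PySem.List.pyRange 6 (-1) (-2)).map
        (fun i => PySem.List.slice (pvOct8 (PySem.Int.band n 16777215).toNat) (some i) (some (i + 2))))) := by
  refine String.toList_inj.mp ?_
  rw [PySem.Str.toList_join, String.toList_ofList, pv_band24]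
  -- unroll A's loop
  simp only [List.range_succ, List.range_zero, List.foldl_append, List.foldl_cons,
    List.foldl_nil, List.nil_append, List.map_append, List.map_cons, List.map_nil,
    pv_shr3, pv_band7, PySem.Int.toList_toStr]
  -- collapse the division chains
  have e2 : n / 8 / 8 = n / 64 := by omega
  have e3 : n / 64 / 8 = n / 512 := by omega
  have e4 : n / 512 / 8 = n / 4096 := by omega
  have e5 : n / 4096 / 8 = n / 32768 := by omega
  have e6 : n / 32768 / 8 = n / 262144 := by omega
  have e7 : n / 262144 / 8 = n / 2097152 := by omega
  simp only [e2, e3, e4, e5, e6, e7]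
  -- unroll B
  have hr : PySem.List.pyRange 6 (-1) (-2) = [6, 4, 2, 0] := by decide
  rw [hr]
  simp only [List.map_cons, List.map_nil, pvOct8, List.range_succ, List.range_zero,
    List.map_append, List.nil_append]
  norm_num
  simp only [PySem.List.slice, PySem.List.clampIdx]
  norm_num
  simp only [PySem.Chars.join, List.intercalate]

  have h0 : PySem.Int.toChars (n % 8) = [((n % 16777216).toNat % 8).digitChar] := by
    rw [pv_toChars_digit _ (by omega) (by omega)]
    exact congrArg (fun x => [Nat.digitChar x]) (by omega)
  have h1 : PySem.Int.toChars (n / 8 % 8) = [((n % 16777216).toNat / 8 % 8).digitChar] := by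
    rw [pv_toChars_digit _ (by omega) (by omega)]
    exact congrArg (fun x => [Nat.digitChar x]) (by omega)
  have h2 : PySem.Int.toChars (n / 64 % 8) = [((n % 16777216).toNat / 64 % 8).digitChar] := by
    rw [pv_toChars_digit _ (by omega) (by omega)]
    exact congrArg (fun x => [Nat.digitChar x]) (by omega)
  have h3 : PySem.Int.toChars (n / 512 % 8) = [((n % 16777216).toNat / 512 % 8).digitChar] := by
    rw [pv_toChars_digit _ (by omega) (by omega)]
    exact congrArg (fun x => [Nat.digitChar x]) (by omega)
  have h4 : PySem.Int.toChars (n / 4096 % 8) = [((n % 16777216).toNat / 4096 % 8).digitChar] := by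
    rw [pv_toChars_digit _ (by omega) (by omega)]
    exact congrArg (fun x => [Nat.digitChar x]) (by omega)
  have h5 : PySem.Int.toChars (n / 32768 % 8) = [((n % 16777216).toNat / 32768 % 8).digitChar] := by
    rw [pv_toChars_digit _ (by omega) (by omega)]
    exact congrArg (fun x => [Nat.digitChar x]) (by omega)
  have h6 : PySem.Int.toChars (n / 262144 % 8) = [((n % 16777216).toNat / 262144 % 8).digitChar] := by
    rw [pv_toChars_digit _ (by omega) (by omega)]
    exact congrArg (fun x => [Nat.digitChar x]) (by omega)
  have h7 : PySem.Int.toChars (n / 2097152 % 8) = [((n % 16777216).toNat / 2097152 % 8).digitChar] := by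
    rw [pv_toChars_digit _ (by omega) (by omega)]
    exact congrArg (fun x => [Nat.digitChar x]) (by omega)
  simp only [h0,h1,h2,h3,h4,h5,h6,h7]
  norm_num [List.intersperse]
  simp only [show Int.toNat 8 = 8 from rfl, show Int.toNat 6 = 6 from rfl,
    show Int.toNat 4 = 4 from rfl, show Int.toNat 2 = 2 from rfl]
  simp

-- ===== VERDICT (by name: the statement is the Claim_ definition above) =====
theorem block_id_spec : Claim_equal_block_id := by
  intro hi cb lo _
  unfold Spec_block_id block_id block_id_alt
  exact pv_core _
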